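-- pv_equiv track=rewrite | github.com/JainLabWUSM/lightsheetsubmission | Networks/network_analytics/power.py | get_histogram_lists
-- ===== SOURCE A (Python) =====
-- def get_histogram_lists(neighbors):
--     y_len = max(neighbors)
--     y_list = list(range(1, y_len + 1))
--     x_list = []
--
--     for i in range(1, y_len + 1):
--         x = neighbors.count(i)
--         x_list.append(x)
--
--     return x_list, y_list
-- ===== SOURCE B (Python) =====
-- def get_histogram_lists(neighbors):
--     # Sort a copy, skip entries < 1, then one grouped pass: the run length of
--     # each value i in the sorted list is its histogram count.
--     y_len = max(neighbors)
--     y_list = list(range(1, y_len + 1))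
--     s = sorted(neighbors)
--     j = 0
--     n = len(s)
--     while j < n and s[j] < 1:
--         j += 1
--     x_list = []
--     for i in range(1, y_len + 1):
--         c = 0
--         while j < n and s[j] == i:
--             c += 1
--             j += 1
--         x_list.append(c)
--     return x_list, y_list
-- ===== Notes on version B (the rewrite author's own statement) =====
-- stated objective: faster
-- what changed: replaces the per-bin neighbors.count re-scan with one sort of a copy followed by a single grouped pointer pass that reads each bin's count off as a run length
-- outside the precondition, e.g. on get_histogram_lists([]): A raises ValueError, B raises ValueError
import Mathlib
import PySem

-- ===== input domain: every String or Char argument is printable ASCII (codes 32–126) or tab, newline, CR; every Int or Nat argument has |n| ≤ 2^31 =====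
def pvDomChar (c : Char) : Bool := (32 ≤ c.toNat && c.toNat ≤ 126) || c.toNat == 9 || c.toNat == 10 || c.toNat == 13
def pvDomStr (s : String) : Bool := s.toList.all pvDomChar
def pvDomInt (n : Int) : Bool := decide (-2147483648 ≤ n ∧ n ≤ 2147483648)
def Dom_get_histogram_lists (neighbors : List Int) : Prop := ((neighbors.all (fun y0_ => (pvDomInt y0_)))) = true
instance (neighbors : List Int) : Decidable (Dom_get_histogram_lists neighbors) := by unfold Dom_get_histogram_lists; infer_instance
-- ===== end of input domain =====

-- B sorts a copy and reads each bin's count off as a run length in one grouped pass,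
-- instead of A's per-bin neighbors.count re-scan (objective: faster).

-- ===== PORT A =====
def get_histogram_lists (neighbors : List Int) : List Int × List Int :=
  match PySem.List.max? neighbors (fun y => y) with
  | none => ([], [])  -- max([]) raises ValueError; excluded by Pre_
  | some y_len =>
    let y_list := PySem.List.pyRange 1 (y_len + 1) 1
    let x_list := y_list.foldl
      (fun acc i => acc ++ [((PySem.List.count neighbors i : Nat) : Int)]) ([] : List Int)
    (x_list, y_list)

-- ===== PORT B =====
-- the initial 'while j < n and s[j] < 1' pointer skip, as consumption of the sorted list
def pvSkipLt1 (s : List Int) : List Int :=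
  match s with
  | [] => []
  | x :: t => if x < 1 then pvSkipLt1 t else x :: t

-- the inner 'while j < n and s[j] == i' run: (run length, rest of the sorted list)
def pvRun (s : List Int) (i : Int) : Int × List Int :=
  match s with
  | [] => (0, [])
  | x :: t =>
    if x = i then
      let p := pvRun t i
      (p.1 + 1, p.2)
    else (0, x :: t)

def get_histogram_lists_alt (neighbors : List Int) : List Int × List Int :=
  match PySem.List.max? neighbors (fun y => y) with
  | none => ([], [])  -- max([]) raises ValueError; excluded by Pre_
  | some y_len =>
    let y_list := PySem.List.pyRange 1 (y_len + 1) 1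
    let s := PySem.List.sorted neighbors (fun y => y) false
    let res := y_list.foldl
      (fun (p : List Int × List Int) i =>
        let r := pvRun p.2 i
        (p.1 ++ [r.1], r.2))
      (([] : List Int), pvSkipLt1 s)
    (res.1, y_list)

-- ===== PRECONDITION & SPEC =====
-- Pre_ excludes only the empty list, on which both A and B raise ValueError (max([])).
def Pre_get_histogram_lists (neighbors : List Int) : Prop := neighbors ≠ []
instance (neighbors : List Int) : Decidable (Pre_get_histogram_lists neighbors) := by unfold Pre_get_histogram_lists; infer_instance
def pvWitness_get_histogram_lists : List Int := [3, 1, 1, -2]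

def Spec_get_histogram_lists (neighbors : List Int) (out : List Int × List Int) : Prop := out = get_histogram_lists_alt neighbors
instance (neighbors : List Int) (out : List Int × List Int) : Decidable (Spec_get_histogram_lists neighbors out) := by unfold Spec_get_histogram_lists; infer_instance

-- ===== CLAIM (what is proved, stated in full; the proofs are below) =====
def Claim_equal_get_histogram_lists : Prop := ∀ (neighbors : List Int), Dom_get_histogram_lists neighbors → Pre_get_histogram_lists neighbors → Spec_get_histogram_lists neighbors (get_histogram_lists neighbors)

-- ===== LEMMAS AND PROOFS =====

-- On a sorted list, the pointer skip keeps exactly the elements ≥ i (dropWhile = filter).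
theorem pvSkipLt1_eq_filter (s : List Int) (hs : s.Pairwise (· ≤ ·)) :
    pvSkipLt1 s = s.filter (fun x => 1 ≤ x) := by
  induction s with
  | nil => rfl
  | cons x t ih =>
    rcases List.pairwise_cons.1 hs with ⟨hx, ht⟩
    by_cases h : x < 1
    · simp [pvSkipLt1, h, ih ht, show ¬ (1 ≤ x) by omega]
    · have : List.filter (fun x => decide (1 ≤ x)) t = t :=
        List.filter_eq_self.2 (fun y hy => by have := hx y hy; simp; omega)
      simp [pvSkipLt1, h, show (1:Int) ≤ x by omega, this]

-- On a sorted list with only elements ≥ i left, the run of i has length count i and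
-- leaves exactly the elements ≥ i+1.
theorem pvRun_filter (s : List Int) (i : Int) (hs : s.Pairwise (· ≤ ·)) :
    pvRun (s.filter (fun x => i ≤ x)) i
      = (((s.count i : Nat) : Int), s.filter (fun x => i + 1 ≤ x)) := by
  induction s with
  | nil => simp [pvRun]
  | cons x t ih =>
    rcases List.pairwise_cons.1 hs with ⟨hx, ht⟩
    rcases lt_trichotomy x i with h | h | h
    · have h1 : ¬ (i ≤ x) := by omega
      have h2 : ¬ (i + 1 ≤ x) := by omega
      have h3 : x ≠ i := by omega
      simp [h1, h3, ih ht, show ¬ i < x by omega]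
    · subst h
      have h2 : ¬ (x + 1 ≤ x) := by omega
      simp [pvRun, ih ht]
    · have h1 : i ≤ x := by omega
      have h2 : i + 1 ≤ x := by omega
      have htall : ∀ p : Int → Prop, [DecidablePred p] → (∀ y, x ≤ y → p y) →
          List.filter (fun y => decide (p y)) t = t := by
        intro p _ hp
        exact List.filter_eq_self.2 (fun y hy => by simp [hp y (hx y hy)])
      have hti : List.filter (fun y => decide (i ≤ y)) t = t :=
        htall (fun y => i ≤ y) (fun y hy => by omega)
      have hti1 : List.filter (fun y => decide (i + 1 ≤ y)) t = t :=
        htall (fun y => i + 1 ≤ y) (fun y hy => by omega)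
      have hc : (x :: t).count i = 0 := by
        rw [List.count_eq_zero]
        intro hmem
        rcases List.mem_cons.1 hmem with h' | h'
        · omega
        · have := hx i h'; omega
      have hti2 : List.filter (fun y => decide (i < y)) t = t :=
        htall (fun y => i < y) (fun y hy => by omega)
      simp [h1, pvRun, show x ≠ i by omega, hc, hti, h, hti2]

-- The grouped pass over consecutive bins a..b-1 produces the per-bin counts.
theorem pvFold_run (s : List Int) (hs : s.Pairwise (· ≤ ·)) :
    ∀ (k : Nat) (a : Int) (acc : List Int),
      ((PySem.List.pyRange a (a + k) 1).foldl
        (fun (p : List Int × List Int) i =>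
          let r := pvRun p.2 i
          (p.1 ++ [r.1], r.2))
        (acc, s.filter (fun x => a ≤ x))).1
      = acc ++ (PySem.List.pyRange a (a + k) 1).map (fun i => ((s.count i : Nat) : Int)) := by
  intro k
  induction k with
  | zero => intro a acc; simp [PySem.List.pyRange_one_eq_nil]
  | succ k ih =>
    intro a acc
    rw [PySem.List.pyRange_one_cons (by omega : a < a + (k + 1 : Nat))]
    simp only [List.foldl_cons, List.map_cons]
    rw [pvRun_filter s a hs]
    have := ih (a + 1) (acc ++ [((s.count a : Nat) : Int)])
    simp only [show a + 1 + (k : Int) = a + ((k : Nat) + 1 : Nat) by push_cast; ring] at this ⊢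
    rw [this, List.append_assoc]
    rfl

theorem get_histogram_lists_eq (neighbors : List Int)
    (hp : Pre_get_histogram_lists neighbors) :
    get_histogram_lists neighbors = get_histogram_lists_alt neighbors := by
  match neighbors with
  | [] => exact absurd rfl hp
  | h :: t =>
    unfold get_histogram_lists get_histogram_lists_alt
    rw [PySem.List.max?_id_cons]
    simp only
    set m := t.foldl max h with hm
    set s := PySem.List.sorted (h :: t) (fun y => y) false with hsdef
    have hpair : s.Pairwise (· ≤ ·) := PySem.List.sorted_pairwise (h :: t) (fun y => y)
    have hperm : s.Perm (h :: t) := PySem.List.sorted_perm (h :: t) (fun y => y) false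
    rw [pvSkipLt1_eq_filter s hpair]
    by_cases hmb : (1:Int) ≤ m + 1
    · have hfold := pvFold_run s hpair (m + 1 - 1).toNat 1 []
      have harg : (1 : Int) + ((m + 1 - 1).toNat : Int) = m + 1 := by omega
      rw [harg] at hfold
      rw [hfold]
      simp only [List.nil_append, Prod.mk.injEq, and_true]
      rw [PySem.List.foldl_append_singleton_eq_map]
      simp only [List.nil_append]
      apply List.map_congr_left
      intro i _
      simp [hperm.count_eq]
    · rw [PySem.List.pyRange_one_eq_nil (by omega)]
      rfl

-- ===== VERDICT (by name: the statement is the Claim_ definition above) =====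
theorem get_histogram_lists_spec : Claim_equal_get_histogram_lists := by
  intro neighbors _ hp
  exact get_histogram_lists_eq neighbors hp
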